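-- pv_equiv track=rewrite | github.com/chorogrim/verde | programmers/광물 캐기.py | solution
-- ===== SOURCE A (Python) =====
-- def solution(picks, minerals):
--     '''
--     piacks, minerals: 최적의 점수를 계산하는 함수
--     '''
--     answer = 0 # 최종 점수 저장
--     mineralSort = [] # 특정 개수만큼 minerals를 다이아몬드, 철, 돌 순으로 정렬한 리스트를 저장하는데 사용
--
--     ableDigAmont = min(sum(picks) * 5, len(minerals)) # 총 파낼 수 있는 광물의 최대 개수
--     diaCnt, ironCnt, stoneCnt = 0, 0, 0 # 다이아몬드, 철, 돌의 개수를 세기 위한 변수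
--
--     for i in range(ableDigAmont): # ableDigAmont만큼 순회하면서 각 광물의 종류를 확인하고 개수 세어줌
--         if minerals[i] == 'diamond':
--             diaCnt += 1
--         elif minerals[i] == 'iron':
--             ironCnt += 1
--         elif minerals[i] == 'stone':
--             stoneCnt += 1
--
--         if (i + 1) % 5 == 0 or i == ableDigAmont -1: # 매 5개씩 묶거나 마지막 인덱스일 때
--             mineralSort.append((diaCnt, ironCnt, stoneCnt)) # 현재까지 센 다이아몬드, 철, 돌의 개수를 mineralSort에 추가하고
--             diaCnt, ironCnt, stoneCnt = 0, 0, 0 # 카운터를 초기화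
--
--     mineralSort.sort(key = lambda x : (x[0], x[1], x[2]), reverse = True) # mineralSort 리스트를 다이아몬드, 철, 돌의 개수를 기준으로 내림차순 정렬
--
--     i = 0
--     for diaCnt, ironCnt, stoneCnt in mineralSort: # picks에서 사용할 수 있는 곡괭이 찾기
--         while picks[i] == 0: # picks[i]가 0이면 다음 곡갱이로 넘어감
--             i += 1
--
--         if i == 0:
--             answer += (diaCnt + ironCnt + stoneCnt) # 첫 번째 다이아몬드는 다이아몬드, 철, 돌의 개수만큼 점수를 더함
--         elif i == 1:
--             answer += (diaCnt * 5 + ironCnt + stoneCnt) # 두 번째 철은 다이아몬트 개수에 5를 곱한 값, 철, 돌의 개수만큼 점수를 더함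
--         elif i == 2:
--             answer += (diaCnt * 25 + ironCnt * 5 + stoneCnt) # 세 번째 돌은 다이아몬트 개수에 25를 곱한 값, 철 개수에 5를 곱한 값, 돌의 개수만큼 점수를 더함
--
--         picks[i] -= 1 # 사용한 곡괭이의 개수를 하나 줄임
--
--     return answer # 최종적으로 계산된 answer를 반환
-- ===== SOURCE B (Python) =====
-- def solution(picks, minerals):
--     # Counting-bucket re-implementation: tally chunk profiles in a dict and walk the
--     # bounded key space (5..0 per component) in descending order instead of sorting.
--     # Mutates picks in place, like the original.
--     limit = max(0, min(sum(picks) * 5, len(minerals)))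
--     rest = minerals[:limit]
--     counts = {}
--     i0 = 0
--     while i0 < len(rest):
--         chunk = rest[i0:i0 + 5]
--         key = (chunk.count('diamond'), chunk.count('iron'), chunk.count('stone'))
--         counts[key] = counts.get(key, 0) + 1
--         i0 += 5
--     answer = 0
--     i = 0
--     for d in range(5, -1, -1):
--         for r in range(5, -1, -1):
--             for s in range(5, -1, -1):
--                 for _ in range(counts.get((d, r, s), 0)):
--                     while picks[i] == 0:
--                         i += 1
--                     if i == 0:
--                         answer += d + r + s
--                     elif i == 1:
--                         answer += d * 5 + r + s
--                     elif i == 2: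
--                         answer += d * 25 + r * 5 + s
--                     picks[i] -= 1
--     return answer
-- ===== Notes on version B (the rewrite author's own statement) =====
-- stated objective: alternative
-- what changed: B tallies the 5-mineral group profiles into a counting dict built while chunking the prefix with list slices, then walks the bounded (0..5)^3 key space in descending order instead of building a tuple list and comparison-sorting it; pick consumption and in-place mutation of picks are unchanged.
import Mathlib
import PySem

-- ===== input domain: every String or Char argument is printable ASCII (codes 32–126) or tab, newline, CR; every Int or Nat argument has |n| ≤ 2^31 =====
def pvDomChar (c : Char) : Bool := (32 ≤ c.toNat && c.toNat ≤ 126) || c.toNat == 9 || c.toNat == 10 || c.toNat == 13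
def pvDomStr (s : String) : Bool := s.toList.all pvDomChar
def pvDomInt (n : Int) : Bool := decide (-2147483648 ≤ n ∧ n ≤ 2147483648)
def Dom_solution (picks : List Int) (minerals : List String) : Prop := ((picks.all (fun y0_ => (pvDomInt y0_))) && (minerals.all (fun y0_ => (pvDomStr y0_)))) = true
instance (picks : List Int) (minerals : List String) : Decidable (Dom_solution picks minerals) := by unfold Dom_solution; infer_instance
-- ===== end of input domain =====

-- B replaces A's comparison sort of the 5-mineral group profiles by a counting dict walked over
-- the bounded key space in descending order (objective: alternative algorithm, similar cost).
-- Both Pythons mutate `picks` in place identically; the theorems are about the return value.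

-- Shared consumption step: both Pythons contain this code verbatim
-- ('while picks[i]==0: i+=1', the three-way score, 'picks[i]-=1').
-- i is Python's nonnegative int cursor, kept as Nat; out of range (where Python would raise
-- IndexError — unreachable for the group lists both programs build) it scores 0 / no-op.
def pvSkipZeros (picks : List Int) (i : Nat) : Nat :=
  if h : i < picks.length then
    (if picks[i] = 0 then pvSkipZeros picks (i + 1) else i)
  else i
termination_by picks.length - i

def pvMineStep (st : Int × Nat × List Int) (g : Int × Int × Int) : Int × Nat × List Int :=
  let i := pvSkipZeros st.2.2 st.2.1
  let gain : Int :=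
    if i = 0 then g.1 + g.2.1 + g.2.2
    else if i = 1 then g.1 * 5 + g.2.1 + g.2.2
    else if i = 2 then g.1 * 25 + g.2.1 * 5 + g.2.2
    else 0
  (st.1 + gain, i, st.2.2.set i (st.2.2.getD i 0 - 1))

-- ===== PORT A =====
-- sort key: Python compares the tuples (x[0],x[1],x[2]) lexicographically; this is exactly
-- the lexicographic order Lex (Int × Lex (Int × Int)).
def pvKey (x : Int × Int × Int) : Lex (Int × Lex (Int × Int)) := toLex (x.1, toLex (x.2.1, x.2.2))

def solution (picks : List Int) (minerals : List String) : Int :=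
  let able : Int := min (picks.sum * 5) (PySem.List.len minerals)
  -- minerals[i] is always in range (0 ≤ i < able ≤ len); pyGetD "" is the total form
  let built := (PySem.List.pyRange 0 able 1).foldl
    (fun (s : List (Int × Int × Int) × Int × Int × Int) (i : Int) =>
      let m := PySem.List.pyGetD minerals i ""
      let c :=
        if m = "diamond" then (s.2.1 + 1, s.2.2.1, s.2.2.2)
        else if m = "iron" then (s.2.1, s.2.2.1 + 1, s.2.2.2)
        else if m = "stone" then (s.2.1, s.2.2.1, s.2.2.2 + 1)
        else (s.2.1, s.2.2.1, s.2.2.2)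
      if PySem.Int.mod (i + 1) 5 = 0 ∨ i = able - 1 then (s.1 ++ [c], 0, 0, 0)
      else (s.1, c))
    ([], 0, 0, 0)
  let mineralSort := PySem.List.sorted built.1 pvKey true
  (mineralSort.foldl pvMineStep (0, 0, picks)).1

-- ===== PORT B =====
def pvChunkDict (rest : List String) (i0 : Nat) (counts : PySem.Dict (Int × Int × Int) Int) :
    PySem.Dict (Int × Int × Int) Int :=
  if h : i0 < rest.length then
    let chunk := PySem.List.slice rest (some (i0 : Int)) (some ((i0 : Int) + 5))
    let key : Int × Int × Int :=
      ((PySem.List.count chunk "diamond" : Int), (PySem.List.count chunk "iron" : Int),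
        (PySem.List.count chunk "stone" : Int))
    pvChunkDict rest (i0 + 5) (counts.insert key (counts.getD key 0 + 1))
  else counts
termination_by rest.length - i0

def solution_alt (picks : List Int) (minerals : List String) : Int :=
  let limit : Int := max 0 (min (picks.sum * 5) (PySem.List.len minerals))
  let counts := pvChunkDict (PySem.List.slice minerals none (some limit)) 0 PySem.Dict.empty
  let kl := PySem.List.pyRange 5 (-1) (-1)
  (kl.foldl (fun st d =>
      kl.foldl (fun st r =>
        kl.foldl (fun st s =>
          (PySem.List.pyRange 0 (counts.getD (d, r, s) 0) 1).foldl
            (fun st _ => pvMineStep st (d, r, s)) st) st) st)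
    ((0 : Int), (0 : Nat), picks)).1

-- ===== PRECONDITION & SPEC =====
def Spec_solution (picks : List Int) (minerals : List String) (out : Int) : Prop := out = solution_alt picks minerals
instance (picks : List Int) (minerals : List String) (out : Int) : Decidable (Spec_solution picks minerals out) := by unfold Spec_solution; infer_instance

-- ===== CLAIM (what is proved, stated in full; the proofs are below) =====
def Claim_equal_solution : Prop := ∀ (picks : List Int) (minerals : List String), Dom_solution picks minerals → Spec_solution picks minerals (solution picks minerals)

-- ===== LEMMAS AND PROOFS =====

-- group profile of one 5-chunk, and the chunk-profile list both programs effectively build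
def pvProf (c : List String) : Int × Int × Int :=
  ((c.count "diamond" : Int), (c.count "iron" : Int), (c.count "stone" : Int))

def pvChunks (l : List String) : List (Int × Int × Int) :=
  if h : l = [] then [] else pvProf (l.take 5) :: pvChunks (l.drop 5)
termination_by l.length
decreasing_by cases l with
  | nil => exact absurd rfl h
  | cons a t => simp

def pvBump (m : String) (c : Int × Int × Int) : Int × Int × Int :=
  if m = "diamond" then (c.1 + 1, c.2.1, c.2.2)
  else if m = "iron" then (c.1, c.2.1 + 1, c.2.2)
  else if m = "stone" then (c.1, c.2.1, c.2.2 + 1)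
  else (c.1, c.2.1, c.2.2)

lemma pvBump_count (m : String) (c : Int × Int × Int) :
    pvBump m c = (c.1 + if m = "diamond" then 1 else 0,
                  c.2.1 + if m = "iron" then 1 else 0,
                  c.2.2 + if m = "stone" then 1 else 0) := by
  unfold pvBump
  split_ifs <;> simp_all

-- A's per-index loop body, in Nat-index form
def pvStepA (ms : List String) (n : Nat) (s : List (Int × Int × Int) × Int × Int × Int) (k : Nat) :
    List (Int × Int × Int) × Int × Int × Int :=
  if (k + 1) % 5 = 0 ∨ k + 1 = n then (s.1 ++ [pvBump (ms.getD k "") s.2], 0, 0, 0)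
  else (s.1, pvBump (ms.getD k "") s.2)

lemma pv_noflushA (ms : List String) (n : Nat) (ks : List Nat) (acc : List (Int × Int × Int))
    (d r t : Int) (h : ∀ k ∈ ks, ¬((k + 1) % 5 = 0 ∨ k + 1 = n)) :
    ks.foldl (pvStepA ms n) (acc, d, r, t)
      = (acc, d + ((ks.map (fun k => ms.getD k "")).count "diamond" : Int),
              r + ((ks.map (fun k => ms.getD k "")).count "iron" : Int),
              t + ((ks.map (fun k => ms.getD k "")).count "stone" : Int)) := by
  induction ks generalizing d r t with
  | nil => simp
  | cons k ks ih =>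
    have hk := h k (List.mem_cons_self)
    simp only [List.foldl_cons, pvStepA, if_neg hk, pvBump_count]
    rw [ih _ _ _ (fun a ha => h a (List.mem_cons_of_mem _ ha))]
    simp only [List.map_cons, List.count_cons, beq_iff_eq, Prod.ext_iff]
    refine ⟨by trivial, ?_, ?_, ?_⟩ <;> split_ifs <;> push_cast <;> omega

lemma pv_map_getD_range (ms : List String) (m : Nat) (h : m ≤ ms.length) :
    (List.range m).map (fun k => ms.getD k "") = ms.take m := by
  apply List.ext_getElem
  · simp; omega
  · intro i h1 h2
    simp only [List.getElem_map, List.getElem_range, List.getElem_take]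
    simp only [List.length_map, List.length_range] at h1
    exact List.getD_eq_getElem ms "" (by omega)

lemma pv_chunkA (ms : List String) (n m : Nat) (acc : List (Int × Int × Int))
    (hm1 : 1 ≤ m) (hm5 : m ≤ 5) (hmn : m ≤ n) (hlen : m ≤ ms.length)
    (hflush : m % 5 = 0 ∨ m = n) :
    (List.range m).foldl (pvStepA ms n) (acc, 0, 0, 0) = (acc ++ [pvProf (ms.take m)], 0, 0, 0) := by
  have hs : List.range m = List.range (m - 1) ++ [m - 1] := by
    rw [show m = (m - 1) + 1 by omega, List.range_succ]
    simp
  rw [hs, List.foldl_append,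
    pv_noflushA ms n (List.range (m - 1)) acc 0 0 0 (by
      intro k hk
      simp only [List.mem_range] at hk
      omega)]
  simp only [List.foldl_cons, List.foldl_nil, pvStepA]
  rw [if_pos (show ((m - 1) + 1) % 5 = 0 ∨ (m - 1) + 1 = n by omega)]
  have hcount : ∀ v : String, (ms.take m).count v
      = ((List.range (m - 1)).map (fun k => ms.getD k "")).count v
        + (if ms.getD (m - 1) "" = v then 1 else 0) := by
    intro v
    rw [← pv_map_getD_range ms m hlen, hs]
    simp only [List.map_append, List.map_cons, List.map_nil, List.count_append,
      List.count_cons, List.count_nil, beq_iff_eq, Nat.zero_add]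
  refine congrArg (fun z => (acc ++ [z], (0:Int), (0:Int), (0:Int))) ?_
  rw [pvBump_count]
  simp only [pvProf, Prod.ext_iff]
  refine ⟨?_, ?_, ?_⟩ <;> rw [hcount] <;> split_ifs <;> push_cast <;> omega

lemma pv_stepA_shift (ms : List String) (n : Nat) (hn : 5 ≤ n) (s) (k : Nat) :
    pvStepA ms n s (5 + k) = pvStepA (ms.drop 5) (n - 5) s k := by
  have hget : ms.getD (5 + k) "" = (ms.drop 5).getD k "" := by
    simp [List.getD, List.getElem?_drop]
  simp only [pvStepA, hget]
  exact if_congr (by omega) rfl rfl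

lemma pv_mainA : ∀ (n : Nat) (ms : List String) (acc : List (Int × Int × Int)), n ≤ ms.length →
    (List.range n).foldl (pvStepA ms n) (acc, 0, 0, 0) = (acc ++ pvChunks (ms.take n), 0, 0, 0) := by
  intro n
  induction n using Nat.strong_induction_on with
  | _ n ih =>
    intro ms acc hn
    rcases Nat.eq_zero_or_pos n with h0 | h0
    · subst h0
      rw [pvChunks]
      simp
    obtain ⟨m, hm⟩ : ∃ m, m = min 5 n := ⟨_, rfl⟩
    have hml : m ≤ 5 := hm ▸ Nat.min_le_left _ _
    have hmr : m ≤ n := hm ▸ Nat.min_le_right _ _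
    have hC : m = 5 ∨ m = n := by
      rcases Nat.le_total 5 n with h | h
      · left; rw [hm]; exact min_eq_left h
      · right; rw [hm]; exact min_eq_right h
    have hsplit : List.range n = List.range m ++ (List.range (n - m)).map (fun x => m + x) := by
      conv_lhs => rw [show n = m + (n - m) by omega]
      exact List.range_add
    rw [hsplit, List.foldl_append,
      pv_chunkA ms n m acc (by omega) (by omega) (by omega) (by omega) (by omega)]
    have htk : pvChunks (ms.take n) = pvProf (ms.take m) :: pvChunks ((ms.take n).drop 5) := by
      rw [pvChunks, dif_neg (by
        intro hcon
        rw [List.take_eq_nil_iff] at hcon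
        rcases hcon with h | h
        · omega
        · subst h; simp at hn; omega), List.take_take, ← hm]
    by_cases hcase : m = n
    · rw [show n - m = 0 by omega]
      simp only [List.range_zero, List.map_nil, List.foldl_nil]
      rw [htk, List.drop_take, show n - 5 = 0 by omega]
      simp only [List.take_zero]
      rw [pvChunks]
      simp
    · have hm5 : m = 5 := hC.resolve_right hcase
      subst hm5
      rw [List.foldl_map]
      rw [PySem.List.foldl_congr_mem _ _ (fun s k => pvStepA (ms.drop 5) (n - 5) s k) _
        (by intro acc' k _; exact pv_stepA_shift ms n (by omega) acc' k)]
      rw [ih (n - 5) (by omega) (ms.drop 5) (acc ++ [pvProf (ms.take 5)]) (by simp; omega)]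
      rw [htk, List.drop_take, List.append_assoc]
      simp
-- bridge: A's Int-indexed pyRange loop is the Nat-indexed loop
lemma pv_foldA_eq (minerals : List String) (able : Int) (h : able ≤ minerals.length) :
    (PySem.List.pyRange 0 able 1).foldl
      (fun (s : List (Int × Int × Int) × Int × Int × Int) (i : Int) =>
        if PySem.Int.mod (i + 1) 5 = 0 ∨ i = able - 1 then
          (s.1 ++ [if PySem.List.pyGetD minerals i "" = "diamond" then (s.2.1 + 1, s.2.2.1, s.2.2.2)
            else if PySem.List.pyGetD minerals i "" = "iron" then (s.2.1, s.2.2.1 + 1, s.2.2.2)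
            else if PySem.List.pyGetD minerals i "" = "stone" then (s.2.1, s.2.2.1, s.2.2.2 + 1)
            else (s.2.1, s.2.2.1, s.2.2.2)], 0, 0, 0)
        else
          (s.1, if PySem.List.pyGetD minerals i "" = "diamond" then (s.2.1 + 1, s.2.2.1, s.2.2.2)
            else if PySem.List.pyGetD minerals i "" = "iron" then (s.2.1, s.2.2.1 + 1, s.2.2.2)
            else if PySem.List.pyGetD minerals i "" = "stone" then (s.2.1, s.2.2.1, s.2.2.2 + 1)
            else (s.2.1, s.2.2.1, s.2.2.2)))
      ([], 0, 0, 0)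
    = (pvChunks (minerals.take able.toNat), 0, 0, 0) := by
  by_cases hle : able ≤ 0
  · rw [PySem.List.pyRange_one_eq_nil hle, show able.toNat = 0 by omega]
    simp only [List.foldl_nil, List.take_zero]
    rw [pvChunks]
    simp
  · have hpos : 0 < able := by omega
    rw [PySem.List.pyRange_one, show (able - 0).toNat = able.toNat by omega]
    simp only [List.foldl_map]
    rw [PySem.List.foldl_congr_mem _ _ (pvStepA minerals able.toNat) _ ?hcg]
    · exact pv_mainA able.toNat minerals [] (by omega)
    case hcg =>
      intro acc k hk
      simp only [List.mem_range] at hk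
      simp only [zero_add, PySem.List.pyGetD_natCast, pvStepA, pvBump]
      have hmod : PySem.Int.mod ((k : Int) + 1) 5 = (((k + 1) % 5 : Nat) : Int) := by
        rw [PySem.Int.mod_eq_emod_of_pos (by norm_num)]
        push_cast
        omega
      refine if_congr ?_ rfl rfl
      rw [hmod]
      constructor <;> (intro hc; rcases hc with hc | hc)
      · left; exact_mod_cast hc
      · right; omega
      · left; exact_mod_cast hc
      · right; omega

lemma pv_A_eq (picks : List Int) (minerals : List String) :
    solution picks minerals
      = ((PySem.List.sorted
            (pvChunks (minerals.take (min (picks.sum * 5) (minerals.length : Int)).toNat))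
            pvKey true).foldl pvMineStep (0, 0, picks)).1 := by
  unfold solution
  simp only [PySem.List.len_eq]
  exact congrArg
    (fun z : List (Int × Int × Int) × Int × Int × Int =>
      ((PySem.List.sorted z.1 pvKey true).foldl pvMineStep ((0:Int), (0:Nat), picks)).1)
    (pv_foldA_eq minerals (min (picks.sum * 5) ((minerals.length : Nat) : Int))
      (min_le_right _ _))

-- ===== B side =====

lemma pv_chunkDict_eq (rest : List String) (i0 : Nat) (d : PySem.Dict (Int × Int × Int) Int) :
    pvChunkDict rest i0 d
      = (pvChunks (rest.drop i0)).foldl (fun d k => d.insert k (d.getD k 0 + 1)) d := by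
  suffices H : ∀ (N : Nat) (i0 : Nat), rest.length - i0 ≤ N →
      ∀ d, pvChunkDict rest i0 d
        = (pvChunks (rest.drop i0)).foldl (fun d k => d.insert k (d.getD k 0 + 1)) d from
    H (rest.length - i0) i0 le_rfl d
  intro N
  induction N with
  | zero =>
    intro i0 hlen d
    rw [pvChunkDict, dif_neg (by omega), List.drop_eq_nil_of_le (by omega), pvChunks]
    simp
  | succ N ihN =>
    intro i0 hlen d
    by_cases h : i0 < rest.length
    · rw [pvChunkDict, dif_pos h]
      have hchunk : PySem.List.slice rest (some (i0 : Int)) (some ((i0 : Int) + 5))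
          = (rest.drop i0).take 5 := by
        have := PySem.List.slice_natCast_add (xs := rest) (j := i0) (n := 5)
        simpa using this
      conv_rhs => rw [pvChunks,
        dif_neg (show ¬ rest.drop i0 = [] by rw [List.drop_eq_nil_iff]; omega)]
      simp only [List.foldl_cons, List.drop_drop]
      rw [hchunk, ihN (i0 + 5) (by omega)]
      simp only [PySem.List.count, pvProf]
    · rw [pvChunkDict, dif_neg h, List.drop_eq_nil_of_le (by omega), pvChunks]
      simp

lemma pv_counts_getD (L : List String) (k : Int × Int × Int) :
    (pvChunkDict L 0 PySem.Dict.empty).getD k 0 = ((pvChunks L).count k : Int) := by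
  rw [pv_chunkDict_eq, List.drop_zero, PySem.Dict.getD_foldl_insert_add_one]
  simp

-- the 216-element descending key table
def pvKeyList : List Int := PySem.List.pyRange 5 (-1) (-1)

def pvAllKeys : List (Int × Int × Int) :=
  pvKeyList.flatMap (fun d => pvKeyList.flatMap (fun r => pvKeyList.map (fun s => (d, r, s))))

set_option maxRecDepth 100000 in
lemma pv_keyList_eq : pvKeyList = [5, 4, 3, 2, 1, 0] := by decide

set_option maxRecDepth 100000 in
set_option maxHeartbeats 2000000 in
lemma pv_allKeys_nodup : pvAllKeys.Nodup := by decide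

set_option maxRecDepth 100000 in
set_option maxHeartbeats 4000000 in
lemma pv_allKeys_pairwise : pvAllKeys.Pairwise (fun a b => pvKey b < pvKey a) := by decide

lemma pv_mem_allKeys {g : Int × Int × Int} (h1 : 0 ≤ g.1) (h2 : g.1 ≤ 5) (h3 : 0 ≤ g.2.1)
    (h4 : g.2.1 ≤ 5) (h5 : 0 ≤ g.2.2) (h6 : g.2.2 ≤ 5) : g ∈ pvAllKeys := by
  have hm : ∀ x : Int, 0 ≤ x → x ≤ 5 → x ∈ pvKeyList := by
    intro x hx1 hx2
    rw [pv_keyList_eq]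
    simp
    omega
  simp only [pvAllKeys, List.mem_flatMap, List.mem_map]
  exact ⟨g.1, hm _ h1 h2, g.2.1, hm _ h3 h4, g.2.2, hm _ h5 h6, rfl⟩

lemma pv_chunks_mem (l : List String) : ∀ g ∈ pvChunks l, g ∈ pvAllKeys := by
  suffices H : ∀ (N : Nat) (l : List String), l.length ≤ N → ∀ g ∈ pvChunks l, g ∈ pvAllKeys from
    H l.length l le_rfl
  intro N
  induction N with
  | zero =>
    intro l hlen g hg
    have hnil : l = [] := by
      cases l with
      | nil => rfl
      | cons a t => simp at hlen
    subst hnil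
    rw [pvChunks] at hg
    simp at hg
  | succ N ihN =>
    intro l hlen g hg
    by_cases hl : l = []
    · subst hl
      rw [pvChunks] at hg
      simp at hg
    · have hp : 0 < l.length := List.length_pos_iff.mpr hl
      rw [pvChunks, dif_neg hl] at hg
      rcases List.mem_cons.mp hg with hg | hg
      · subst hg
        have hb : ∀ v : String, (l.take 5).count v ≤ 5 :=
          fun v => le_trans List.count_le_length (by simp [List.length_take])
        refine pv_mem_allKeys (by simp [pvProf]) (by simp only [pvProf]; exact_mod_cast hb _)
          (by simp [pvProf]) (by simp only [pvProf]; exact_mod_cast hb _)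
          (by simp [pvProf]) (by simp only [pvProf]; exact_mod_cast hb _)
      · exact ihN (l.drop 5) (by simp; omega) g hg

def pvExpand (gs : List (Int × Int × Int)) : List (Int × Int × Int) :=
  pvAllKeys.flatMap (fun k => List.replicate (gs.count k) k)

lemma pv_count_flat (ks : List (Int × Int × Int)) (hnd : ks.Nodup)
    (n : Int × Int × Int → Nat) (x : Int × Int × Int) :
    (ks.flatMap (fun k => List.replicate (n k) k)).count x = if x ∈ ks then n x else 0 := by
  induction ks with
  | nil => simp
  | cons k ks ih =>
    simp only [List.flatMap_cons, List.count_append, List.count_replicate,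
      ih (List.Nodup.of_cons hnd)]
    by_cases hx : x = k
    · subst hx
      have hnk : x ∉ ks := (List.nodup_cons.mp hnd).1
      simp [hnk]
    · simp [beq_iff_eq, hx, Ne.symm hx, List.mem_cons]

lemma pv_perm_expand (gs : List (Int × Int × Int)) (h : ∀ g ∈ gs, g ∈ pvAllKeys) :
    (pvExpand gs).Perm gs := by
  rw [List.perm_iff_count]
  intro x
  rw [pvExpand, pv_count_flat _ pv_allKeys_nodup]
  by_cases hx : x ∈ pvAllKeys
  · simp [hx]
  · rw [if_neg hx]
    exact (List.count_eq_zero.mpr (fun hmem => hx (h x hmem))).symm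

lemma pv_pairwise_flat (ks : List (Int × Int × Int))
    (hp : ks.Pairwise (fun a b => pvKey b < pvKey a)) (gs : List (Int × Int × Int)) :
    (ks.flatMap (fun k => List.replicate (gs.count k) k)).Pairwise
      (fun a b => pvKey b ≤ pvKey a) := by
  induction ks with
  | nil => simp
  | cons k ks ih =>
    simp only [List.flatMap_cons]
    rw [List.pairwise_append]
    refine ⟨List.pairwise_replicate.mpr (Or.inr le_rfl), ih hp.of_cons, ?_⟩
    intro a ha b hb
    have ha' : a = k := List.eq_of_mem_replicate ha
    rcases List.mem_flatMap.mp hb with ⟨k', hk', hb'⟩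
    have hb'' : b = k' := List.eq_of_mem_replicate hb'
    subst ha'
    subst hb''
    exact le_of_lt ((List.pairwise_cons.mp hp).1 b hk')

lemma pv_key_inj : Function.Injective pvKey := by
  intro a b h
  have h1 := congrArg ofLex h
  have h2 : a.1 = b.1 := congrArg Prod.fst h1
  have h3 := congrArg (fun p => ofLex p.2) h1
  have h4 : a.2.1 = b.2.1 := congrArg Prod.fst h3
  have h5 : a.2.2 = b.2.2 := congrArg Prod.snd h3
  exact Prod.ext h2 (Prod.ext h4 h5)

lemma pv_sorted_eq_expand (gs : List (Int × Int × Int)) (h : ∀ g ∈ gs, g ∈ pvAllKeys) :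
    PySem.List.sorted gs pvKey true = pvExpand gs := by
  apply PySem.List.eq_of_perm_of_pairwise_le_of_injective
    (key := fun g => OrderDual.toDual (pvKey g))
  · exact fun a b hab => pv_key_inj (by simpa using hab)
  · exact (PySem.List.sorted_perm gs pvKey true).trans (pv_perm_expand gs h).symm
  · exact (PySem.List.sorted_pairwise_rev gs pvKey).imp (fun hab => by simpa using hab)
  · exact (pv_pairwise_flat pvAllKeys pv_allKeys_pairwise gs).imp (fun hab => by simpa using hab)

-- consumption loop conversions
lemma pv_foldl_const_iterate {α β : Type} (f : β → β) :
    ∀ (l : List α) (i : β), l.foldl (fun s _ => f s) i = f^[l.length] i := by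
  intro l
  induction l with
  | nil => simp
  | cons a l ih =>
    intro i
    simp [ih, Function.iterate_succ_apply]

lemma pv_replicate_foldl {β : Type} (F : β → Int × Int × Int → β) (c : Nat)
    (k : Int × Int × Int) (i : β) :
    (List.replicate c k).foldl F i = (fun s => F s k)^[c] i := by
  induction c generalizing i with
  | zero => simp
  | succ c ih => simp [List.replicate_succ, ih, Function.iterate_succ_apply]

lemma pv_pyRange_foldl_const {β : Type} (c : Nat) (F : β → β) (i : β) :
    (PySem.List.pyRange 0 (c : Int) 1).foldl (fun s _ => F s) i = F^[c] i := by
  rw [pv_foldl_const_iterate]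
  congr 1
  rw [PySem.List.length_pyRange_one]
  omega

lemma pv_B_eq (picks : List Int) (minerals : List String) :
    solution_alt picks minerals
      = ((pvExpand (pvChunks
            (minerals.take (max 0 (min (picks.sum * 5) (minerals.length : Int))).toNat))).foldl
          pvMineStep (0, 0, picks)).1 := by
  unfold solution_alt
  simp only [PySem.List.len_eq]
  rw [PySem.List.slice_to minerals (le_max_left 0 _)]
  simp only [pv_counts_getD, pvExpand, pvAllKeys, pvKeyList, List.foldl_flatMap,
    List.foldl_map, pv_replicate_foldl, pv_pyRange_foldl_const]

-- ===== VERDICT (by name: the statement is the Claim_ definition above) =====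
theorem solution_spec : Claim_equal_solution := by
  intro picks minerals _hdom
  unfold Spec_solution
  rw [pv_A_eq picks minerals, pv_B_eq picks minerals]
  rw [show (min (picks.sum * 5) ((minerals.length : Nat) : Int)).toNat
      = (max 0 (min (picks.sum * 5) ((minerals.length : Nat) : Int))).toNat by omega]
  rw [pv_sorted_eq_expand _ (pv_chunks_mem _)]
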